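-- pv_equiv track=rewrite | github.com/Imraj-Rabbani/BRACU-CSE221 | Lab_4/task6.py | max_diamonds
-- ===== SOURCE A (Python) =====
-- def dfs(grid, row, col, visited):
--     if row < 0 or col < 0 or row >= len(grid) or col >= len(grid[0]) or grid[row][col] == '#' or visited[row][col]:
--         return 0
--
--     if grid[row][col] == 'D':
--         diamonds = 1
--     else:
--         diamonds = 0
--     visited[row][col] = 1
--
--     for dr, dc in [(0, 1), (1, 0), (0, -1), (-1, 0)]:
--         diamonds += dfs(grid, row + dr, col + dc, visited)
--
--     return diamonds
--
-- def max_diamonds(grid):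
--     rows = len(grid)
--     cols = len(grid[0])
--     visited = []
--
--     for num in range(rows):
--         visited.append([0]*cols)
--     max_diamond_count = 0
--
--     for i in range(rows):
--         for j in range(cols):
--             if grid[i][j] == '.' and not visited[i][j]:
--                 diamonds_collected = dfs(grid, i, j, visited)
--                 max_diamond_count = max(max_diamond_count, diamonds_collected)
--
--     return max_diamond_count
-- ===== SOURCE B (Python) =====
-- def max_diamonds(grid):
--     rows = len(grid)
--     cols = len(grid[0])
--     visited = [[0] * cols for _ in range(rows)]
--     best = 0
--     for i in range(rows):
--         for j in range(cols):
--             if grid[i][j] == '.' and not visited[i][j]: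
--                 stack = [(i, j)]
--                 count = 0
--                 while stack:
--                     r, c = stack.pop()
--                     if r < 0 or c < 0 or r >= rows or c >= cols or grid[r][c] == '#' or visited[r][c]:
--                         continue
--                     visited[r][c] = 1
--                     if grid[r][c] == 'D':
--                         count += 1
--                     stack += [(r - 1, c), (r, c - 1), (r + 1, c), (r, c + 1)]
--                 best = max(best, count)
--     return best
-- ===== Notes on version B (the rewrite author's own statement) =====
-- stated objective: alternative
-- what changed: The recursive dfs is replaced by an iterative flood fill with an explicit stack (pop a cell, skip if blocked or visited, mark, count diamonds, push the four neighbours), so no call recursion remains.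
import Mathlib
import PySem

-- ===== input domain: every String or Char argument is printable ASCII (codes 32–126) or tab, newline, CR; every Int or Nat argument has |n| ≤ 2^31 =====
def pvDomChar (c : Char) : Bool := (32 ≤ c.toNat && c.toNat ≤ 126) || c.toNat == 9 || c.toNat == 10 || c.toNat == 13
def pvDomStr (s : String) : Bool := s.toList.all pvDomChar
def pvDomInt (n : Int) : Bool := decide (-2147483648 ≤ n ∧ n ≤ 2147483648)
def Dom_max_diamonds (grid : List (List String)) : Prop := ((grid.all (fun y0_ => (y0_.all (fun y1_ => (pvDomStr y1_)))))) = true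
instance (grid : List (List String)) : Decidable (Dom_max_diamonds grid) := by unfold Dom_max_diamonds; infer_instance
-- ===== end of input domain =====

-- B replaces A's recursive dfs by an iterative explicit-stack flood fill (no call recursion); return values proved equal.
-- (A mutates no caller-visible data except its own local 'visited'; both Pythons are pure in their arguments.)

-- ===== PORT A =====
-- grid[r][c] for 0 ≤ r,c already guarded in range (guards check 0 ≤ r < len(grid), 0 ≤ c < len(grid[0]);
-- Pre_ makes every row at least len(grid[0]) long), so plain getElem? with getD is exact there.
def sget (g : List (List String)) (r c : Int) : String :=
  ((g[r.toNat]?.getD [])[c.toNat]?).getD ""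

-- visited[r][c]; default 1 ("already visited") is unreachable on admitted inputs (access is guarded in range).
def vget (v : List (List Int)) (r c : Int) : Int :=
  ((v[r.toNat]?.getD [])[c.toNat]?).getD 1

-- visited[r][c] = 1 (in-place list update, threaded functionally)
def set2 (v : List (List Int)) (r c : Int) : List (List Int) :=
  v.set r.toNat ((v[r.toNat]?.getD []).set c.toNat 1)

-- the guard of A's dfs (identical condition is tested by B's fill loop, with rows/cols the same values)
def guardB (g : List (List String)) (r c : Int) (v : List (List Int)) : Bool :=
  decide (r < 0) || decide (c < 0) || decide ((g.length : Int) ≤ r) ||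
  decide (((g.headD []).length : Int) ≤ c) || (sget g r c == "#") || (vget v r c != 0)

-- A's dfs; fuel only bounds the recursion depth (depth ≤ #cells + 1, so the fuel A's port passes is sufficient)
def dfsF : Nat → List (List String) → Int → Int → List (List Int) → Int × List (List Int)
  | 0, _, _, _, v => (0, v)
  | n + 1, g, r, c, v =>
    if guardB g r c v then (0, v)
    else
      let d : Int := if sget g r c == "D" then 1 else 0
      let p1 := dfsF n g r (c + 1) (set2 v r c)
      let p2 := dfsF n g (r + 1) c p1.2
      let p3 := dfsF n g r (c - 1) p2.2
      let p4 := dfsF n g (r - 1) c p3.2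
      (d + p1.1 + p2.1 + p3.1 + p4.1, p4.2)

def max_diamonds (grid : List (List String)) : Int :=
  let rows : Int := grid.length
  let cols : Int := (grid.headD []).length  -- len(grid[0]); Python raises IndexError on [], excluded by Pre_
  let visited : List (List Int) :=
    (PySem.List.pyRange 0 rows 1).foldl (fun v _ => v ++ [List.replicate cols.toNat 0]) []
  let res :=
    (PySem.List.pyRange 0 rows 1).foldl (fun st i =>
      (PySem.List.pyRange 0 cols 1).foldl (fun st j =>
        if sget grid i j == "." && vget st.1 i j == 0 then
          let p := dfsF (rows.toNat * cols.toNat + 1) grid i j st.1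
          (p.2, max st.2 p.1)
        else st) st) (visited, (0 : Int))
  res.2

-- ===== PORT B =====
-- B's while-loop flood fill; the Python stack's top (list end) is the HEAD of the Lean list, so
-- 'stack += [(r-1,c),(r,c-1),(r+1,c),(r,c+1)]; stack.pop()' pops (r,c+1) first = head here.
-- Fuel only bounds the number of loop iterations (≤ 4·#cells + 2, so the fuel B's port passes is sufficient).
def fillF : Nat → List (List String) → List (Int × Int) → List (List Int) → Int → Int × List (List Int)
  | 0, _, _, v, cnt => (cnt, v)
  | _ + 1, _, [], v, cnt => (cnt, v)
  | n + 1, g, (r, c) :: st, v, cnt =>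
    if guardB g r c v then fillF n g st v cnt
    else
      fillF n g ((r, c + 1) :: (r + 1, c) :: (r, c - 1) :: (r - 1, c) :: st)
        (set2 v r c) (cnt + (if sget g r c == "D" then 1 else 0))

def max_diamonds_alt (grid : List (List String)) : Int :=
  let rows : Int := grid.length
  let cols : Int := (grid.headD []).length
  let visited : List (List Int) :=
    (PySem.List.pyRange 0 rows 1).map (fun _ => List.replicate cols.toNat 0)
  let res :=
    (PySem.List.pyRange 0 rows 1).foldl (fun st i =>
      (PySem.List.pyRange 0 cols 1).foldl (fun st j =>
        if sget grid i j == "." && vget st.1 i j == 0 then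
          let p := fillF (4 * (rows.toNat * cols.toNat) + 2) grid [(i, j)] st.1 0
          (p.2, max st.2 p.1)
        else st) st) (visited, (0 : Int))
  res.2

-- ===== PRECONDITION & SPEC =====
-- Pre_ excludes exactly the inputs on which Python A raises IndexError: the empty grid (grid[0]) and
-- grids with a row shorter than the first row (the outer loop reads grid[i][j] for every j < len(grid[0])).
def Pre_max_diamonds (grid : List (List String)) : Prop :=
  grid ≠ [] ∧ ∀ row ∈ grid, (grid.headD []).length ≤ row.length
instance (grid : List (List String)) : Decidable (Pre_max_diamonds grid) := by
  unfold Pre_max_diamonds; infer_instance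

def pvWitness_max_diamonds : List (List String) := [[".", "D"], ["#", "."]]

def Spec_max_diamonds (grid : List (List String)) (out : Int) : Prop := out = max_diamonds_alt grid
instance (grid : List (List String)) (out : Int) : Decidable (Spec_max_diamonds grid out) := by
  unfold Spec_max_diamonds; infer_instance

-- ===== CLAIM (what is proved, stated in full; the proofs are below) =====
def Claim_equal_max_diamonds : Prop := ∀ (grid : List (List String)), Dom_max_diamonds grid → Pre_max_diamonds grid → Spec_max_diamonds grid (max_diamonds grid)

-- ===== LEMMAS AND PROOFS =====

-- the termination measure: number of still-unvisited (= 0) entries of the visited matrix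
def mu (v : List (List Int)) : Nat := (v.map (fun row => row.countP (fun x => x == 0))).sum

lemma countP_set_le (p : Int → Bool) (row : List Int) (C : Nat) (x : Int) (hx : p x = false) :
    (row.set C x).countP p ≤ row.countP p := by
  induction row generalizing C with
  | nil => simp
  | cons a t ih =>
    cases C with
    | zero => simp [List.countP_cons, hx]
    | succ n => simp only [List.set_cons_succ, List.countP_cons]; have := ih n; omega

lemma countP_set_lt (p : Int → Bool) (row : List Int) (C : Nat) (x : Int)
    (hx : p x = false) (hC : C < row.length) (hold : p row[C] = true) :
    (row.set C x).countP p < row.countP p := by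
  induction row generalizing C with
  | nil => simp at hC
  | cons a t ih =>
    cases C with
    | zero => simp_all
    | succ n =>
      simp only [List.set_cons_succ, List.countP_cons]
      simp at hC hold
      have := ih n hC hold
      omega

lemma mu_set_le (v : List (List Int)) (R : Nat) (row' : List Int)
    (h : row'.countP (fun x => x == 0) ≤ ((v[R]?.getD []).countP (fun x => x == 0))) :
    mu (v.set R row') ≤ mu v := by
  induction v generalizing R with
  | nil => simp [mu]
  | cons a t ih =>
    cases R with
    | zero => simp [mu] at h ⊢; omega
    | succ n =>
      simp only [List.set_cons_succ, mu, List.map_cons, List.sum_cons]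
      have := ih n (by simpa using h)
      simp only [mu] at this
      omega

lemma mu_set_lt (v : List (List Int)) (R : Nat) (row' : List Int) (hR : R < v.length)
    (h : row'.countP (fun x => x == 0) < (v[R].countP (fun x => x == 0))) :
    mu (v.set R row') < mu v := by
  induction v generalizing R with
  | nil => simp at hR
  | cons a t ih =>
    cases R with
    | zero => simp [mu] at h ⊢; omega
    | succ n =>
      simp only [List.set_cons_succ, mu, List.map_cons, List.sum_cons]
      simp at hR h
      have := ih n hR h
      simp only [mu] at this
      omega

lemma mu_set2_le (v : List (List Int)) (r c : Int) : mu (set2 v r c) ≤ mu v := by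
  unfold set2
  apply mu_set_le
  exact countP_set_le _ _ _ _ (by decide)

lemma mu_set2_lt (v : List (List Int)) (r c : Int) (h : vget v r c = 0) :
    mu (set2 v r c) < mu v := by
  unfold vget at h
  rcases h1 : v[r.toNat]? with _ | row
  · simp [h1] at h
  · rcases h2 : row[c.toNat]? with _ | x
    · simp [h1, h2] at h
    · simp [h1, h2] at h
      have hR : r.toNat < v.length := (List.getElem?_eq_some_iff.mp h1).1
      have hC : c.toNat < row.length := (List.getElem?_eq_some_iff.mp h2).1
      have hrow : v[r.toNat] = row := by
        rcases List.getElem?_eq_some_iff.mp h1 with ⟨_, e⟩; exact e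
      have hx : row[c.toNat] = x := by
        rcases List.getElem?_eq_some_iff.mp h2 with ⟨_, e⟩; exact e
      unfold set2
      apply mu_set_lt _ _ _ hR
      simp only [h1, Option.getD_some, hrow]
      apply countP_set_lt _ _ _ _ (by decide) hC
      rw [hx]; simp [h]

lemma guard_false_unvisited (g : List (List String)) (r c : Int) (v : List (List Int))
    (hg : ¬ (guardB g r c v = true)) : vget v r c = 0 := by
  by_contra hne
  apply hg; unfold guardB; simp [hne]

-- one-step unfoldings of the two fuelled loops
lemma dfsF_succ (n : Nat) (g : List (List String)) (r c : Int) (v : List (List Int)) :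
    dfsF (n + 1) g r c v =
      if guardB g r c v then (0, v)
      else
        ((if sget g r c == "D" then (1 : Int) else 0)
          + (dfsF n g r (c + 1) (set2 v r c)).1
          + (dfsF n g (r + 1) c (dfsF n g r (c + 1) (set2 v r c)).2).1
          + (dfsF n g r (c - 1) (dfsF n g (r + 1) c (dfsF n g r (c + 1) (set2 v r c)).2).2).1
          + (dfsF n g (r - 1) c (dfsF n g r (c - 1) (dfsF n g (r + 1) c (dfsF n g r (c + 1) (set2 v r c)).2).2).2).1,
         (dfsF n g (r - 1) c (dfsF n g r (c - 1) (dfsF n g (r + 1) c (dfsF n g r (c + 1) (set2 v r c)).2).2).2).2) := rfl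

lemma fillF_succ (n : Nat) (g : List (List String)) (r c : Int) (st : List (Int × Int))
    (v : List (List Int)) (cnt : Int) :
    fillF (n + 1) g ((r, c) :: st) v cnt =
      if guardB g r c v then fillF n g st v cnt
      else fillF n g ((r, c + 1) :: (r + 1, c) :: (r, c - 1) :: (r - 1, c) :: st)
        (set2 v r c) (cnt + (if sget g r c == "D" then 1 else 0)) := rfl

lemma dfsF_mu_le (n : Nat) (g : List (List String)) (r c : Int) (v : List (List Int)) :
    mu (dfsF n g r c v).2 ≤ mu v := by
  induction n generalizing r c v with
  | zero => simp [dfsF]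
  | succ n ih =>
    rw [dfsF_succ]
    split
    · simp
    · exact le_trans (ih _ _ _)
        (le_trans (ih _ _ _) (le_trans (ih _ _ _) (le_trans (ih _ _ _) (mu_set2_le _ _ _))))

-- once the fuel exceeds mu v, dfsF no longer depends on it
lemma dfsF_fuel (g : List (List String)) :
    ∀ k, ∀ v, mu v ≤ k → ∀ n m r c, mu v < n → mu v < m →
      dfsF n g r c v = dfsF m g r c v := by
  intro k
  induction k with
  | zero =>
    intro v hv n m r c hn hm
    rcases n with _ | n; · omega
    rcases m with _ | m; · omega
    rw [dfsF_succ, dfsF_succ]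
    split
    · rfl
    · exfalso
      rename_i hg
      have := mu_set2_lt v r c (guard_false_unvisited g r c v hg)
      omega
  | succ k ih =>
    intro v hv n m r c hn hm
    rcases n with _ | n; · omega
    rcases m with _ | m; · omega
    rw [dfsF_succ, dfsF_succ]
    split
    · rfl
    · rename_i hg
      have hlt := mu_set2_lt v r c (guard_false_unvisited g r c v hg)
      have e1 : dfsF n g r (c + 1) (set2 v r c) = dfsF m g r (c + 1) (set2 v r c) :=
        ih _ (by omega) _ _ _ _ (by omega) (by omega)
      rw [← e1]
      have hle1 := dfsF_mu_le n g r (c + 1) (set2 v r c)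
      have e2 : dfsF n g (r + 1) c (dfsF n g r (c + 1) (set2 v r c)).2
              = dfsF m g (r + 1) c (dfsF n g r (c + 1) (set2 v r c)).2 :=
        ih _ (by omega) _ _ _ _ (by omega) (by omega)
      rw [← e2]
      have hle2 := dfsF_mu_le n g (r + 1) c (dfsF n g r (c + 1) (set2 v r c)).2
      have e3 : dfsF n g r (c - 1) (dfsF n g (r + 1) c (dfsF n g r (c + 1) (set2 v r c)).2).2
              = dfsF m g r (c - 1) (dfsF n g (r + 1) c (dfsF n g r (c + 1) (set2 v r c)).2).2 :=
        ih _ (by omega) _ _ _ _ (by omega) (by omega)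
      rw [← e3]
      have hle3 := dfsF_mu_le n g r (c - 1)
        (dfsF n g (r + 1) c (dfsF n g r (c + 1) (set2 v r c)).2).2
      have e4 : dfsF n g (r - 1) c (dfsF n g r (c - 1) (dfsF n g (r + 1) c (dfsF n g r (c + 1) (set2 v r c)).2).2).2
              = dfsF m g (r - 1) c (dfsF n g r (c - 1) (dfsF n g (r + 1) c (dfsF n g r (c + 1) (set2 v r c)).2).2).2 :=
        ih _ (by omega) _ _ _ _ (by omega) (by omega)
      rw [← e4]

lemma fillF_fuel (g : List (List String)) :
    ∀ k, ∀ (st : List (Int × Int)) v, st.length + 4 * mu v ≤ k → ∀ n m cnt,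
      st.length + 4 * mu v < n → st.length + 4 * mu v < m →
      fillF n g st v cnt = fillF m g st v cnt := by
  intro k
  induction k with
  | zero =>
    intro st v hv n m cnt hn hm
    rcases n with _ | n; · omega
    rcases m with _ | m; · omega
    rcases st with _ | ⟨⟨r, c⟩, st⟩
    · rfl
    · simp at hv
  | succ k ih =>
    intro st v hv n m cnt hn hm
    rcases n with _ | n; · omega
    rcases m with _ | m; · omega
    rcases st with _ | ⟨⟨r, c⟩, st⟩
    · rfl
    · rw [fillF_succ, fillF_succ]
      split
      · exact ih st v (by simp at hv ⊢; omega) n m cnt (by simp at hn ⊢; omega)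
          (by simp at hm ⊢; omega)
      · rename_i hg
        have hlt := mu_set2_lt v r c (guard_false_unvisited g r c v hg)
        apply ih
        · simp at hv ⊢; omega
        · simp at hn ⊢; omega
        · simp at hm ⊢; omega

-- canonical (fuel-free) views of the two traversals
def DFS (g : List (List String)) (r c : Int) (v : List (List Int)) : Int × List (List Int) :=
  dfsF (mu v + 1) g r c v

def FILL (g : List (List String)) (st : List (Int × Int)) (v : List (List Int)) (cnt : Int) :
    Int × List (List Int) :=
  fillF (st.length + 4 * mu v + 1) g st v cnt

lemma DFS_mu_le (g : List (List String)) (r c : Int) (v : List (List Int)) :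
    mu (DFS g r c v).2 ≤ mu v := dfsF_mu_le _ _ _ _ _

lemma DFS_skip (g : List (List String)) (r c : Int) (v : List (List Int))
    (hg : guardB g r c v = true) : DFS g r c v = (0, v) := by
  have h : DFS g r c v = dfsF (mu v + 1) g r c v := rfl
  rw [h, dfsF_succ, if_pos hg]

lemma DFS_step (g : List (List String)) (r c : Int) (v : List (List Int))
    (hg : ¬ (guardB g r c v = true)) :
    DFS g r c v =
      ((if sget g r c == "D" then (1 : Int) else 0)
        + (DFS g r (c + 1) (set2 v r c)).1
        + (DFS g (r + 1) c (DFS g r (c + 1) (set2 v r c)).2).1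
        + (DFS g r (c - 1) (DFS g (r + 1) c (DFS g r (c + 1) (set2 v r c)).2).2).1
        + (DFS g (r - 1) c (DFS g r (c - 1) (DFS g (r + 1) c (DFS g r (c + 1) (set2 v r c)).2).2).2).1,
       (DFS g (r - 1) c (DFS g r (c - 1) (DFS g (r + 1) c (DFS g r (c + 1) (set2 v r c)).2).2).2).2) := by
  have hlt := mu_set2_lt v r c (guard_false_unvisited g r c v hg)
  have e1 : dfsF (mu v) g r (c + 1) (set2 v r c) = DFS g r (c + 1) (set2 v r c) := by
    have h : DFS g r (c + 1) (set2 v r c) = dfsF (mu (set2 v r c) + 1) g r (c + 1) (set2 v r c) := rfl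
    rw [h]
    exact dfsF_fuel g (mu (set2 v r c)) _ le_rfl _ _ _ _ (by omega) (by omega)
  have m1 := DFS_mu_le g r (c + 1) (set2 v r c)
  have e2 : dfsF (mu v) g (r + 1) c (DFS g r (c + 1) (set2 v r c)).2
          = DFS g (r + 1) c (DFS g r (c + 1) (set2 v r c)).2 := by
    have h : DFS g (r + 1) c (DFS g r (c + 1) (set2 v r c)).2
           = dfsF (mu (DFS g r (c + 1) (set2 v r c)).2 + 1) g (r + 1) c (DFS g r (c + 1) (set2 v r c)).2 := rfl
    rw [h]
    exact dfsF_fuel g (mu (DFS g r (c + 1) (set2 v r c)).2) _ le_rfl _ _ _ _ (by omega) (by omega)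
  have m2 := DFS_mu_le g (r + 1) c (DFS g r (c + 1) (set2 v r c)).2
  have e3 : dfsF (mu v) g r (c - 1) (DFS g (r + 1) c (DFS g r (c + 1) (set2 v r c)).2).2
          = DFS g r (c - 1) (DFS g (r + 1) c (DFS g r (c + 1) (set2 v r c)).2).2 := by
    have h : DFS g r (c - 1) (DFS g (r + 1) c (DFS g r (c + 1) (set2 v r c)).2).2
           = dfsF (mu (DFS g (r + 1) c (DFS g r (c + 1) (set2 v r c)).2).2 + 1) g r (c - 1)
               (DFS g (r + 1) c (DFS g r (c + 1) (set2 v r c)).2).2 := rfl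
    rw [h]
    exact dfsF_fuel g (mu (DFS g (r + 1) c (DFS g r (c + 1) (set2 v r c)).2).2) _ le_rfl _ _ _ _
      (by omega) (by omega)
  have m3 := DFS_mu_le g r (c - 1) (DFS g (r + 1) c (DFS g r (c + 1) (set2 v r c)).2).2
  have e4 : dfsF (mu v) g (r - 1) c
              (DFS g r (c - 1) (DFS g (r + 1) c (DFS g r (c + 1) (set2 v r c)).2).2).2
          = DFS g (r - 1) c (DFS g r (c - 1) (DFS g (r + 1) c (DFS g r (c + 1) (set2 v r c)).2).2).2 := by
    have h : DFS g (r - 1) c (DFS g r (c - 1) (DFS g (r + 1) c (DFS g r (c + 1) (set2 v r c)).2).2).2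
           = dfsF (mu (DFS g r (c - 1) (DFS g (r + 1) c (DFS g r (c + 1) (set2 v r c)).2).2).2 + 1)
               g (r - 1) c (DFS g r (c - 1) (DFS g (r + 1) c (DFS g r (c + 1) (set2 v r c)).2).2).2 := rfl
    rw [h]
    exact dfsF_fuel g (mu (DFS g r (c - 1) (DFS g (r + 1) c (DFS g r (c + 1) (set2 v r c)).2).2).2)
      _ le_rfl _ _ _ _ (by omega) (by omega)
  have hD : DFS g r c v = dfsF (mu v + 1) g r c v := rfl
  rw [hD, dfsF_succ, if_neg hg, e1, e2, e3, e4]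

lemma FILL_nil (g : List (List String)) (v : List (List Int)) (cnt : Int) :
    FILL g [] v cnt = (cnt, v) := rfl

lemma FILL_skip (g : List (List String)) (r c : Int) (st : List (Int × Int))
    (v : List (List Int)) (cnt : Int) (hg : guardB g r c v = true) :
    FILL g ((r, c) :: st) v cnt = FILL g st v cnt := by
  unfold FILL
  simp only [List.length_cons]
  rw [show st.length + 1 + 4 * mu v + 1 = (st.length + 4 * mu v + 1) + 1 from by ring,
    fillF_succ, if_pos hg]

lemma FILL_push (g : List (List String)) (r c : Int) (st : List (Int × Int))
    (v : List (List Int)) (cnt : Int) (hg : ¬ (guardB g r c v = true)) :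
    FILL g ((r, c) :: st) v cnt
      = FILL g ((r, c + 1) :: (r + 1, c) :: (r, c - 1) :: (r - 1, c) :: st)
          (set2 v r c) (cnt + (if sget g r c == "D" then 1 else 0)) := by
  have hlt := mu_set2_lt v r c (guard_false_unvisited g r c v hg)
  unfold FILL
  simp only [List.length_cons]
  rw [show st.length + 1 + 4 * mu v + 1 = (st.length + 4 * mu v + 1) + 1 from by ring,
    fillF_succ, if_neg hg]
  exact fillF_fuel g (((r, c + 1) :: (r + 1, c) :: (r, c - 1) :: (r - 1, c) :: st).length
      + 4 * mu (set2 v r c)) _ _ le_rfl _ _ _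
    (by simp only [List.length_cons]; omega) (by simp only [List.length_cons]; omega)

-- the simulation: popping one cell off the stack performs exactly one recursive dfs from that cell
lemma sim (g : List (List String)) :
    ∀ k, ∀ v, mu v ≤ k → ∀ r c (st : List (Int × Int)) cnt,
      FILL g ((r, c) :: st) v cnt
        = FILL g st (DFS g r c v).2 (cnt + (DFS g r c v).1) := by
  intro k
  induction k with
  | zero =>
    intro v hv r c st cnt
    by_cases hg : guardB g r c v = true
    · rw [FILL_skip g r c st v cnt hg, DFS_skip g r c v hg]
      congr 1
      omega
    · exfalso
      have := mu_set2_lt v r c (guard_false_unvisited g r c v hg)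
      omega
  | succ k ih =>
    intro v hv r c st cnt
    by_cases hg : guardB g r c v = true
    · rw [FILL_skip g r c st v cnt hg, DFS_skip g r c v hg]
      congr 1
      omega
    · have hlt := mu_set2_lt v r c (guard_false_unvisited g r c v hg)
      have m1 := DFS_mu_le g r (c + 1) (set2 v r c)
      have m2 := DFS_mu_le g (r + 1) c (DFS g r (c + 1) (set2 v r c)).2
      have m3 := DFS_mu_le g r (c - 1) (DFS g (r + 1) c (DFS g r (c + 1) (set2 v r c)).2).2
      calc FILL g ((r, c) :: st) v cnt
          = FILL g ((r, c + 1) :: (r + 1, c) :: (r, c - 1) :: (r - 1, c) :: st)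
              (set2 v r c) (cnt + (if sget g r c == "D" then 1 else 0)) :=
            FILL_push g r c st v cnt hg
        _ = FILL g ((r + 1, c) :: (r, c - 1) :: (r - 1, c) :: st)
              (DFS g r (c + 1) (set2 v r c)).2
              (cnt + (if sget g r c == "D" then 1 else 0) + (DFS g r (c + 1) (set2 v r c)).1) :=
            ih _ (by omega) _ _ _ _
        _ = FILL g ((r, c - 1) :: (r - 1, c) :: st)
              (DFS g (r + 1) c (DFS g r (c + 1) (set2 v r c)).2).2
              (cnt + (if sget g r c == "D" then 1 else 0) + (DFS g r (c + 1) (set2 v r c)).1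
                + (DFS g (r + 1) c (DFS g r (c + 1) (set2 v r c)).2).1) :=
            ih _ (by omega) _ _ _ _
        _ = FILL g ((r - 1, c) :: st)
              (DFS g r (c - 1) (DFS g (r + 1) c (DFS g r (c + 1) (set2 v r c)).2).2).2
              (cnt + (if sget g r c == "D" then 1 else 0) + (DFS g r (c + 1) (set2 v r c)).1
                + (DFS g (r + 1) c (DFS g r (c + 1) (set2 v r c)).2).1
                + (DFS g r (c - 1) (DFS g (r + 1) c (DFS g r (c + 1) (set2 v r c)).2).2).1) :=
            ih _ (by omega) _ _ _ _
        _ = FILL g st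
              (DFS g (r - 1) c (DFS g r (c - 1) (DFS g (r + 1) c (DFS g r (c + 1) (set2 v r c)).2).2).2).2
              (cnt + (if sget g r c == "D" then 1 else 0) + (DFS g r (c + 1) (set2 v r c)).1
                + (DFS g (r + 1) c (DFS g r (c + 1) (set2 v r c)).2).1
                + (DFS g r (c - 1) (DFS g (r + 1) c (DFS g r (c + 1) (set2 v r c)).2).2).1
                + (DFS g (r - 1) c (DFS g r (c - 1) (DFS g (r + 1) c (DFS g r (c + 1) (set2 v r c)).2).2).2).1) :=
            ih _ (by omega) _ _ _ _
        _ = FILL g st (DFS g r c v).2 (cnt + (DFS g r c v).1) := by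
            rw [DFS_step g r c v hg]
            congr 1
            ring

-- outer fold machinery
lemma foldl_inv_congr {σ α : Type} (P : σ → Prop) (f g : σ → α → σ)
    (hfg : ∀ s a, P s → f s a = g s a) (hP : ∀ s a, P s → P (f s a)) :
    ∀ (l : List α) (s : σ), P s → l.foldl f s = l.foldl g s := by
  intro l
  induction l with
  | nil => intro s _; rfl
  | cons a t ih =>
    intro s hs
    simp only [List.foldl_cons]
    rw [← hfg s a hs]
    exact ih _ (hP s a hs)

lemma foldl_inv_preserve {σ α : Type} (P : σ → Prop) (f : σ → α → σ)
    (hP : ∀ s a, P s → P (f s a)) :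
    ∀ (l : List α) (s : σ), P s → P (l.foldl f s) := by
  intro l
  induction l with
  | nil => intro s hs; exact hs
  | cons a t ih => intro s hs; exact ih _ (hP s a hs)

lemma foldl_append_singleton {α β : Type} (x : β) (l : List α) (acc : List β) :
    l.foldl (fun v _ => v ++ [x]) acc = acc ++ l.map (fun _ => x) := by
  induction l generalizing acc with
  | nil => simp
  | cons a t ih => simp [ih]

lemma countP_zero_replicate (C : Nat) :
    (List.replicate C (0 : Int)).countP (fun x => x == 0) = C := by
  induction C with
  | zero => rfl
  | succ n ih => simp [List.replicate_succ, ih]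

lemma mu_const {α : Type} (l : List α) (C : Nat) :
    mu (l.map (fun _ => List.replicate C (0 : Int))) = l.length * C := by
  induction l with
  | nil => simp [mu]
  | cons a t ih =>
    simp only [List.map_cons, mu, List.sum_cons, countP_zero_replicate, List.length_cons]
    simp only [mu] at ih
    rw [ih]
    ring

-- one cell of the outer scan: the two inner steps agree whenever mu v ≤ M
lemma step_eq (g : List (List String)) (M : Nat) (i j : Int)
    (s : List (List Int) × Int) (hmu : mu s.1 ≤ M) :
    (if sget g i j == "." && vget s.1 i j == 0 then
       (let p := dfsF (M + 1) g i j s.1; (p.2, max s.2 p.1))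
     else s)
    = (if sget g i j == "." && vget s.1 i j == 0 then
       (let p := fillF (4 * M + 2) g [(i, j)] s.1 0; (p.2, max s.2 p.1))
     else s) := by
  split
  · have hA : dfsF (M + 1) g i j s.1 = DFS g i j s.1 :=
      dfsF_fuel g (mu s.1) s.1 le_rfl _ _ _ _ (by omega) (by omega)
    have hB : fillF (4 * M + 2) g [(i, j)] s.1 0 = FILL g [(i, j)] s.1 0 := by
      unfold FILL
      exact fillF_fuel g ([(i, j)].length + 4 * mu s.1) _ _ le_rfl _ _ _
        (by simp only [List.length_cons, List.length_nil]; omega)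
        (by simp only [List.length_cons, List.length_nil]; omega)
    have hS : FILL g [(i, j)] s.1 0 = ((DFS g i j s.1).1, (DFS g i j s.1).2) := by
      rw [sim g (mu s.1) s.1 le_rfl i j [] 0, FILL_nil]
      congr 1
      omega
    simp only [hA, hB, hS]
  · rfl

lemma step_mu (g : List (List String)) (M : Nat) (i j : Int)
    (s : List (List Int) × Int) (hmu : mu s.1 ≤ M) :
    mu ((if sget g i j == "." && vget s.1 i j == 0 then
       (let p := dfsF (M + 1) g i j s.1; (p.2, max s.2 p.1))
     else s)).1 ≤ M := by
  split
  · exact le_trans (dfsF_mu_le _ _ _ _ _) hmu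
  · exact hmu

-- ===== VERDICT (by name: the statement is the Claim_ definition above) =====
theorem max_diamonds_spec : Claim_equal_max_diamonds := by
  unfold Claim_equal_max_diamonds
  intro grid _ _
  unfold Spec_max_diamonds max_diamonds max_diamonds_alt
  simp only [Int.toNat_natCast]
  rw [foldl_append_singleton, List.nil_append]
  congr 1
  apply foldl_inv_congr (fun s => mu s.1 ≤ grid.length * ((grid.headD []).length))
  · intro s i hs
    apply foldl_inv_congr (fun s => mu s.1 ≤ grid.length * ((grid.headD []).length))
    · intro s j hs
      exact step_eq grid _ i j s hs
    · intro s j hs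
      exact step_mu grid _ i j s hs
    · exact hs
  · intro s i hs
    exact foldl_inv_preserve _ _ (fun s j hs => step_mu grid _ i j s hs) _ _ hs
  · show mu ((PySem.List.pyRange 0 (↑grid.length) 1).map
        (fun _ => List.replicate ((grid.headD []).length) (0 : Int))) ≤ _
    rw [mu_const]
    have : (PySem.List.pyRange 0 (↑grid.length) 1).length = grid.length := by
      rw [PySem.List.length_pyRange_one]
      omega
    rw [this]
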